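-- pv_equiv track=rewrite | github.com/johannes-lee/eLife_dPAG-ensembles-represent-approach-and-avoidance-states | helpers.py | labelfoldbymouse
-- ===== SOURCE A (Python) =====
-- def labelfoldbymouse(folds, mousenums):
--     labels = ['']*len(folds)
--     for i, fold in enumerate(folds):
--         for mouse in mousenums:
--             if mouse in fold:
--                 labels[i] = mouse
--                 break
--     return labels
-- ===== SOURCE B (Python) =====
-- def labelfoldbymouse(folds, mousenums):
--     labels = [''] * len(folds)
--     for mouse in reversed(mousenums):
--         labels = [mouse if mouse in fold else lbl for lbl, fold in zip(labels, folds)]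
--     return labels
-- ===== Notes on version B (the rewrite author's own statement) =====
-- stated objective: alternative
-- what changed: Loop interchange: instead of scanning mousenums per fold with an early break and index mutation, B sweeps mousenums in reverse and rebuilds the whole labels list each pass (overwrite, so the earliest-listed matching mouse wins).
import Mathlib
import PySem

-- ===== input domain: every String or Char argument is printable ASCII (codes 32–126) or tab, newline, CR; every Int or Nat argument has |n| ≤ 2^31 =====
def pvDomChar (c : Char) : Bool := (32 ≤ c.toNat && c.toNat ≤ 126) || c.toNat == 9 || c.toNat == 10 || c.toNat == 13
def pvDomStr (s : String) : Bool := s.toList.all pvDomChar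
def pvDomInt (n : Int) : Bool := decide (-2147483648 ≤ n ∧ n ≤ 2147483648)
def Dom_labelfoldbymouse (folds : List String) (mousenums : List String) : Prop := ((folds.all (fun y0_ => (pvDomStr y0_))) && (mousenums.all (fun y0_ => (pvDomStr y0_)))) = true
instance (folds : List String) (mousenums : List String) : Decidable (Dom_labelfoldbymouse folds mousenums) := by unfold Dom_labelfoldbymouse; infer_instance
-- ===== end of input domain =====

-- B interchanges the loops: a reverse sweep over mousenums rebuilding the labels list each pass
-- (overwrite, earliest-listed matching mouse wins) — alternative structure, same exact result.

-- ===== PORT A =====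
-- inner 'for mouse in mousenums: if mouse in fold: labels[i] = mouse; break'
-- (i comes from enumerate, always 0 ≤ i < len(labels), so labels[i] = mouse is List.set i.toNat — exact here)
def pvInnerA (labels : List String) (i : Int) (fold : String) : List String → List String
  | [] => labels
  | m :: rest =>
      if PySem.Str.isIn m fold then labels.set i.toNat m
      else pvInnerA labels i fold rest

def labelfoldbymouse (folds : List String) (mousenums : List String) : List String :=
  let labels := List.replicate folds.length ""
  (PySem.List.enumerate folds).foldl
    (fun labels p => pvInnerA labels p.1 p.2 mousenums) labels

-- ===== PORT B =====
def labelfoldbymouse_alt (folds : List String) (mousenums : List String) : List String :=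
  let labels := List.replicate folds.length ""
  mousenums.reverse.foldl
    (fun labels m =>
      (labels.zip folds).map (fun p => if PySem.Str.isIn m p.2 then m else p.1))
    labels

-- ===== PRECONDITION & SPEC =====
def Spec_labelfoldbymouse (folds : List String) (mousenums : List String) (out : List String) : Prop := out = labelfoldbymouse_alt folds mousenums
instance (folds : List String) (mousenums : List String) (out : List String) : Decidable (Spec_labelfoldbymouse folds mousenums out) := by unfold Spec_labelfoldbymouse; infer_instance

-- ===== CLAIM (what is proved, stated in full; the proofs are below) =====
def Claim_equal_labelfoldbymouse : Prop := ∀ (folds : List String) (mousenums : List String), Dom_labelfoldbymouse folds mousenums → Spec_labelfoldbymouse folds mousenums (labelfoldbymouse folds mousenums)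

-- ===== LEMMAS AND PROOFS =====

-- first mouse (in ms order) occurring as a substring of fold, if any
def pvFm? (ms : List String) (fold : String) : Option String :=
  match ms with
  | [] => none
  | m :: rest => if PySem.Str.isIn m fold then some m else pvFm? rest fold

theorem pvZipMapSelf {α β : Type} (l : List α) (h : α → β) :
    (l.map h).zip l = l.map (fun x => (h x, x)) := by
  induction l with
  | nil => rfl
  | cons a t ih => simp [ih]

theorem pvInnerA_eq (labels : List String) (i : Int) (fold : String) (ms : List String) :
    pvInnerA labels i fold ms =
      match pvFm? ms fold with
      | some m => labels.set i.toNat m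
      | none => labels := by
  induction ms with
  | nil => rfl
  | cons m rest ih =>
      simp only [pvInnerA, pvFm?]
      split_ifs with h <;> simp [ih]

theorem pvOuterA (ms : List String) (rest : List String) :
    ∀ (pre tail : List String), tail.length = rest.length →
    (PySem.List.enumerate rest (pre.length : Int)).foldl
        (fun labels p => pvInnerA labels p.1 p.2 ms) (pre ++ tail)
      = pre ++ (tail.zip rest).map (fun p => (pvFm? ms p.2).getD p.1) := by
  induction rest with
  | nil =>
      intro pre tail h
      simp at h
      simp [PySem.List.enumerate_nil, h]
  | cons fold rest' ih =>
      intro pre tail h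
      cases tail with
      | nil => simp at h
      | cons t tail' =>
        simp only [List.length_cons] at h
        rw [PySem.List.enumerate_cons, List.foldl_cons, pvInnerA_eq]
        have hset : ∀ (m : String),
            (pre ++ t :: tail').set ((pre.length : Int)).toNat m = (pre ++ [m]) ++ tail' := by
          intro m
          rw [Int.toNat_natCast, List.set_append_right _ _ (Nat.le_refl _)]
          simp
        have hkeep : pre ++ t :: tail' = (pre ++ [t]) ++ tail' := by simp
        have hlen : ∀ (x : String), ((pre.length : Int) + 1) = (((pre ++ [x]).length : Nat) : Int) := by
          intro x; simp
        cases hfm : pvFm? ms fold with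
        | some m =>
            dsimp only
            rw [hset m, hlen m, ih (pre ++ [m]) tail' (by omega)]
            simp [hfm]
        | none =>
            dsimp only
            rw [hkeep, hlen t, ih (pre ++ [t]) tail' (by omega)]
            simp [hfm]

theorem pvA_map (folds ms : List String) :
    labelfoldbymouse folds ms = folds.map (fun f => (pvFm? ms f).getD "") := by
  show (PySem.List.enumerate folds ((0 : Nat) : Int)).foldl
        (fun labels p => pvInnerA labels p.1 p.2 ms) (List.replicate folds.length "") = _
  have := pvOuterA ms folds [] (List.replicate folds.length "") (by simp)
  simp only [List.length_nil, List.nil_append] at this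
  rw [this]
  have hrep : List.replicate folds.length ("" : String)
      = folds.map (fun _ => "") := by simp [List.map_const']
  rw [hrep, pvZipMapSelf, List.map_map]
  simp [Function.comp]

theorem pvB_map (folds ms : List String) :
    labelfoldbymouse_alt folds ms = folds.map (fun f => (pvFm? ms f).getD "") := by
  show ms.reverse.foldl
      (fun labels m => (labels.zip folds).map (fun p => if PySem.Str.isIn m p.2 then m else p.1))
      (List.replicate folds.length "") = _
  rw [List.foldl_reverse]
  have hrep : List.replicate folds.length ("" : String)
      = folds.map (fun _ => "") := by simp [List.map_const']
  rw [hrep]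
  have key : ∀ (l : List String) (g : String → String),
      l.foldr (fun m labels =>
          (labels.zip folds).map (fun p => if PySem.Str.isIn m p.2 then m else p.1))
        (folds.map g)
      = folds.map (fun f => (pvFm? l f).getD (g f)) := by
    intro l
    induction l with
    | nil => intro g; rfl
    | cons m rest ihl =>
        intro g
        simp only [List.foldr_cons, ihl]
        rw [pvZipMapSelf, List.map_map]
        apply List.map_congr_left
        intro f _
        simp only [Function.comp, pvFm?]
        split_ifs with h <;> simp
  exact key ms (fun _ => "")

-- ===== VERDICT (by name: the statement is the Claim_ definition above) =====
theorem labelfoldbymouse_spec : Claim_equal_labelfoldbymouse := by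
  intro folds mousenums _
  show labelfoldbymouse folds mousenums = labelfoldbymouse_alt folds mousenums
  rw [pvA_map, pvB_map]
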